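-- pv_equiv track=rewrite | github.com/Tiyanak/digital-signature-algorithms | fileHelper.py | get_hex32_value
-- ===== SOURCE A (Python) =====
-- def get_hexc_value(name, keydata):
--     ## Used for retrieving various data. Returns all of the data associated
--     ## with the key (or name), but merged in a single string.
--     if name not in keydata:
--         return None
--     return ''.join(keydata[name])
--
-- def get_hex32_value(name, keydata):
--     ## Used for retriving various data that represents hexadecimal numbers.
--     ## Returns a list of positive decimal numbers that correspond to 8-digit
--     ## hexadecimal numbers.
--     if name not in keydata:
--         return None
--     data = get_hexc_value(name, keydata)
--     length = len(data)
--     if length % 8 != 0: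
--         data = data.zfill(length + 8 - length % 8)
--     position = 0
--     bit32 = []
--     while position < len(data):
--         bit32.append(int(data[position:position + 8], 16))
--         position += 8
--     return bit32
-- ===== SOURCE B (Python) =====
-- def get_hex32_value(name, keydata):
--     ## Parse the merged key data once as a single hexadecimal integer and
--     ## extract the 32-bit words by shifting, instead of re-parsing 8-char slices.
--     if name not in keydata:
--         return None
--     data = ''.join(keydata[name])
--     if not data:
--         return []
--     data = '0' * ((-len(data)) % 8) + data
--     total = int(data, 16)
--     n = len(data) // 8
--     return [(total >> (32 * (n - 1 - i))) & 0xFFFFFFFF for i in range(n)]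
-- ===== Notes on version B (the rewrite author's own statement) =====
-- stated objective: alternative
-- what changed: B parses the zero-padded merged string once into a single integer and extracts each 32-bit word most-significant first by shifting and masking, instead of A's loop that slices 8-character substrings and calls int(chunk, 16) on each.
-- outside the precondition, e.g. on get_hex32_value('k', {'k': ['0x0000010x000001']}): A returns [1, 1], B raises ValueError
import Mathlib
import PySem

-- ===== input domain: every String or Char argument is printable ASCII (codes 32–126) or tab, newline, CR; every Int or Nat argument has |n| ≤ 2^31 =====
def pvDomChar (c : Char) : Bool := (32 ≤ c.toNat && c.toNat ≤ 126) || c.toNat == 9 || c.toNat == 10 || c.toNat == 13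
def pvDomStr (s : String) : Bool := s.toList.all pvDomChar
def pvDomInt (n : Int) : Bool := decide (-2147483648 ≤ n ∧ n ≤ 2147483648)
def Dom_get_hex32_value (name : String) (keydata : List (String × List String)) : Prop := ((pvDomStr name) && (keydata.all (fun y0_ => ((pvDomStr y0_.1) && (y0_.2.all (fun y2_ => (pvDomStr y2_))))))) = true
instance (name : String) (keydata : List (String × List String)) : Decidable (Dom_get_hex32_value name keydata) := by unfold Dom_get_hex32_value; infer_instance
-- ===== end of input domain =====

-- B re-implements A by parsing the padded merged string once into a single integer and
-- extracting the 32-bit words by shift-and-mask, instead of slicing and re-parsing 8-char chunks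
-- (objective: alternative; same cost, proved equal on all-hex-digit data).

-- ===== PORT A =====

-- hand port of one hex digit of int(s, 16) (PySem.Int.ofCharsBase? exists but its internals are
-- private, so the parse is ported by hand): exact on hexadecimal digit characters
def hexDigit? (c : Char) : Option Nat :=
  if 48 ≤ c.toNat ∧ c.toNat ≤ 57 then some (c.toNat - 48)
  else if 97 ≤ c.toNat ∧ c.toNat ≤ 102 then some (c.toNat - 87)
  else if 65 ≤ c.toNat ∧ c.toNat ≤ 70 then some (c.toNat - 55)
  else none

-- hand port of int(s, 16): exact on nonempty strings of pure hexadecimal digits (the Pre_ domain);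
-- Python additionally tolerates surrounding whitespace, a sign, an '0x' prefix and underscores,
-- which Pre_ excludes.  none = ValueError.
def pyIntHex? (cs : List Char) : Option Nat :=
  if cs = [] then none
  else cs.foldl (fun acc c =>
    match acc, hexDigit? c with
    | some a, some d => some (16 * a + d)
    | _, _ => none) (some 0)

def get_hexc_value (name : String) (keydata : List (String × List String)) : Option (List Char) :=
  if (PySem.Dict.mk keydata).contains name = false then none
  else some (PySem.Chars.join [] (((PySem.Dict.mk keydata).getD name []).map String.toList))

-- A's while loop: slice 8 characters, parse them, advance by 8
def hex32Loop : List Char → Option (List Int)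
  | [] => some []
  | c :: cs =>
    match pyIntHex? (List.take 8 (c :: cs)), hex32Loop (List.drop 8 (c :: cs)) with
    | some v, some rest => some ((v : Int) :: rest)
    | _, _ => none   -- Python raises ValueError on a non-hex chunk (excluded by Pre_)
termination_by cs => cs.length
decreasing_by simp only [List.length_drop, List.length_cons]; omega

def get_hex32_value (name : String) (keydata : List (String × List String)) : Option (List Int) :=
  if (PySem.Dict.mk keydata).contains name = false then none
  else
    match get_hexc_value name keydata with
    | none => none   -- unreachable: the guard ensured name is a key
    | some data0 =>
      let length := data0.length
      let data := if length % 8 ≠ 0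
        then PySem.Chars.zfill data0 ((length : Int) + 8 - (length : Int) % 8)
        else data0
      hex32Loop data

-- ===== PORT B =====

def get_hex32_value_alt (name : String) (keydata : List (String × List String)) : Option (List Int) :=
  if (PySem.Dict.mk keydata).contains name = false then none
  else
    let data := PySem.Chars.join [] (((PySem.Dict.mk keydata).getD name []).map String.toList)
    if data.isEmpty then some []
    else
      let padded := List.replicate ((-(data.length : Int)) % 8).toNat '0' ++ data
      match pyIntHex? padded with
      | some total =>
        some ((List.range (padded.length / 8)).map
          (fun i => (((total >>> (32 * (padded.length / 8 - 1 - i))) &&& 4294967295 : Nat) : Int)))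
      | none => none   -- Python raises ValueError here (excluded by Pre_)

-- ===== PRECONDITION & SPEC =====

def isHexChar (c : Char) : Bool :=
  decide ((48 ≤ c.toNat ∧ c.toNat ≤ 57) ∨ (97 ≤ c.toNat ∧ c.toNat ≤ 102) ∨ (65 ≤ c.toNat ∧ c.toNat ≤ 70))

-- Pre_ excludes inputs whose merged key data contains any character other than a hexadecimal
-- digit: on most of those A raises ValueError, and on the rest (whitespace / sign / '0x' inside
-- an 8-char chunk, tolerated by per-chunk int(...,16)) a whole-string parse raises instead.
def Pre_get_hex32_value (name : String) (keydata : List (String × List String)) : Prop :=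
  (((PySem.Dict.mk keydata).getD name []).all (fun s => s.toList.all isHexChar)) = true
instance (name : String) (keydata : List (String × List String)) : Decidable (Pre_get_hex32_value name keydata) := by unfold Pre_get_hex32_value; infer_instance

def pvWitness_get_hex32_value : String × (List (String × List String)) :=
  ("k", [("k", ["0012ABCD", "ff"])])

def Spec_get_hex32_value (name : String) (keydata : List (String × List String)) (out : Option (List Int)) : Prop := out = get_hex32_value_alt name keydata
instance (name : String) (keydata : List (String × List String)) (out : Option (List Int)) : Decidable (Spec_get_hex32_value name keydata out) := by unfold Spec_get_hex32_value; infer_instance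

-- ===== CLAIM (what is proved, stated in full; the proofs are below) =====
def Claim_equal_get_hex32_value : Prop := ∀ (name : String) (keydata : List (String × List String)), Dom_get_hex32_value name keydata → Pre_get_hex32_value name keydata → Spec_get_hex32_value name keydata (get_hex32_value name keydata)

-- ===== LEMMAS AND PROOFS =====

-- the value of a hex digit (0 for non-digits; only used on hex digits)
def hval (c : Char) : Nat := (hexDigit? c).getD 0

-- the value of a string of hex digits (Horner)
def hnat (cs : List Char) : Nat := cs.foldl (fun a c => 16 * a + hval c) 0

theorem hexDigit?_of (c : Char) (h : isHexChar c = true) : hexDigit? c = some (hval c) := by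
  unfold hval
  cases hd : hexDigit? c with
  | some d => simp
  | none =>
    exfalso
    simp only [isHexChar, decide_eq_true_eq] at h
    simp only [hexDigit?] at hd
    split_ifs at hd
    all_goals omega

theorem hval_lt (c : Char) : hval c < 16 := by
  unfold hval hexDigit?
  split_ifs <;> simp <;> omega

theorem foldl_hnat (cs : List Char) (a : Nat) :
    cs.foldl (fun a c => 16 * a + hval c) a = a * 16 ^ cs.length + hnat cs := by
  induction cs generalizing a with
  | nil => simp [hnat]
  | cons c cs ih =>
    simp only [List.foldl_cons, List.length_cons]
    rw [ih (16 * a + hval c), show hnat (c :: cs) = (c :: cs).foldl (fun a c => 16 * a + hval c) 0 from rfl]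
    simp only [List.foldl_cons]
    rw [ih (16 * 0 + hval c)]
    ring

theorem hnat_append (xs ys : List Char) :
    hnat (xs ++ ys) = hnat xs * 16 ^ ys.length + hnat ys := by
  unfold hnat
  rw [List.foldl_append, foldl_hnat]
  rfl

theorem hnat_lt (cs : List Char) : hnat cs < 16 ^ cs.length := by
  induction cs with
  | nil => simp [hnat]
  | cons c cs ih =>
    have h1 : hnat (c :: cs) = hval c * 16 ^ cs.length + hnat cs := by
      have := hnat_append [c] cs
      simpa [hnat] using this
    have h2 := hval_lt c
    have : hval c * 16 ^ cs.length + hnat cs < (hval c + 1) * 16 ^ cs.length := by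
      have := ih; nlinarith [pow_pos (by norm_num : (0:ℕ) < 16) cs.length]
    calc hnat (c :: cs) < (hval c + 1) * 16 ^ cs.length := by rw [h1]; exact this
      _ ≤ 16 * 16 ^ cs.length := by
          have : hval c + 1 ≤ 16 := h2
          exact Nat.mul_le_mul_right _ this
      _ = 16 ^ (c :: cs).length := by rw [List.length_cons]; ring

theorem foldl_opt (cs : List Char) (h : cs.all isHexChar = true) (a : Nat) :
    cs.foldl (fun acc c =>
      match acc, hexDigit? c with
      | some a, some d => some (16 * a + d)
      | _, _ => none) (some a)
    = some (cs.foldl (fun a c => 16 * a + hval c) a) := by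
  induction cs generalizing a with
  | nil => simp
  | cons c cs ih =>
    simp only [List.all_cons, Bool.and_eq_true] at h
    simp only [List.foldl_cons, hexDigit?_of c h.1]
    exact ih h.2 (16 * a + hval c)

theorem pyIntHex?_eq (cs : List Char) (h : cs.all isHexChar = true) (hne : cs ≠ []) :
    pyIntHex? cs = some (hnat cs) := by
  unfold pyIntHex?
  rw [if_neg hne, foldl_opt cs h 0]
  rfl

theorem mask_eq (a : Nat) : a &&& 4294967295 = a % 4294967296 := by
  have := Nat.and_two_pow_sub_one_eq_mod a 32
  norm_num at this
  omega

theorem pow16_eq (m : Nat) : (16 : ℕ) ^ (8 * m) = 2 ^ (32 * m) := by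
  rw [show (16:ℕ) = 2 ^ 4 from rfl, ← pow_mul]
  ring_nf

theorem shift_head (F R : List Char) (hF : F.length = 8) (n : Nat) (hR : R.length = 8 * n) :
    (hnat (F ++ R) >>> (32 * n)) &&& 4294967295 = hnat F := by
  rw [mask_eq, Nat.shiftRight_eq_div_pow, hnat_append, hR]
  have hRlt : hnat R < 2 ^ (32 * n) := by rw [← pow16_eq, ← hR]; exact hnat_lt R
  have hFlt : hnat F < 4294967296 := by
    have := hnat_lt F; rw [hF] at this; norm_num at this; omega
  rw [pow16_eq]
  have hpos : 0 < 2 ^ (32 * n) := pow_pos (by norm_num) _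
  rw [mul_comm (hnat F) (2 ^ (32 * n)), Nat.mul_add_div hpos, Nat.div_eq_of_lt hRlt]
  omega

theorem shift_tail (F R : List Char) (_hF : F.length = 8) (n : Nat) (hR : R.length = 8 * n)
    (j : Nat) (hj : j < n) :
    (hnat (F ++ R) >>> (32 * j)) &&& 4294967295 = (hnat R >>> (32 * j)) &&& 4294967295 := by
  rw [mask_eq, mask_eq, Nat.shiftRight_eq_div_pow, Nat.shiftRight_eq_div_pow, hnat_append, hR,
    pow16_eq]
  have hsplit : 32 * n = 32 * j + 32 + (32 * n - 32 * j - 32) := by omega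
  set e := 32 * n - 32 * j - 32 with he
  have h2 : (2:ℕ) ^ (32 * n) = 2 ^ (32 * j) * (4294967296 * 2 ^ e) := by
    rw [hsplit, pow_add, pow_add]; norm_num [mul_assoc]
  rw [h2, show hnat F * (2 ^ (32 * j) * (4294967296 * 2 ^ e)) + hnat R
        = hnat R + 2 ^ (32 * j) * (hnat F * (4294967296 * 2 ^ e)) by ring,
    Nat.add_mul_div_left _ _ (pow_pos (by norm_num : (0:ℕ) < 2) _),
    show hnat F * (4294967296 * 2 ^ e) = 4294967296 * (hnat F * 2 ^ e) by ring,
    Nat.add_mul_mod_self_left]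

theorem all_take (cs : List Char) (k : Nat) (h : cs.all isHexChar = true) :
    (List.take k cs).all isHexChar = true := by
  rw [List.all_eq_true] at h ⊢
  exact fun x hx => h x (List.take_subset k cs hx)

theorem all_drop (cs : List Char) (k : Nat) (h : cs.all isHexChar = true) :
    (List.drop k cs).all isHexChar = true := by
  rw [List.all_eq_true] at h ⊢
  exact fun x hx => h x (List.drop_subset k cs hx)

-- A's chunked loop equals B's extraction from the single Horner value
theorem loop_eq_extract (n : Nat) : ∀ P : List Char, P.length = 8 * n → P.all isHexChar = true →
    hex32Loop P = some ((List.range n).map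
      (fun i => (((hnat P >>> (32 * (n - 1 - i))) &&& 4294967295 : Nat) : Int))) := by
  induction n with
  | zero =>
    intro P hl _
    rw [List.length_eq_zero_iff] at hl
    subst hl
    simp [hex32Loop]
  | succ n ih =>
    intro P hl hhex
    cases P with
    | nil => simp at hl
    | cons c cs =>
      have hlen : (c :: cs).length = 8 * (n + 1) := hl
      have hF : (List.take 8 (c :: cs)).length = 8 := by
        rw [List.length_take]; omega
      have hR : (List.drop 8 (c :: cs)).length = 8 * n := by
        rw [List.length_drop]; omega
      have hFhex := all_take (c :: cs) 8 hhex
      have hRhex := all_drop (c :: cs) 8 hhex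
      have hFne : List.take 8 (c :: cs) ≠ [] := by
        intro h; rw [h] at hF; simp at hF
      have hsplit : List.take 8 (c :: cs) ++ List.drop 8 (c :: cs) = c :: cs :=
        List.take_append_drop 8 (c :: cs)
      rw [hex32Loop, pyIntHex?_eq _ hFhex hFne, ih _ hR hRhex]
      simp only []
      congr 1
      rw [List.range_succ_eq_map, List.map_cons, List.map_map]
      congr 1
      · -- head: the most significant word is the first chunk
        have := shift_head (List.take 8 (c :: cs)) (List.drop 8 (c :: cs)) hF n hR
        rw [hsplit] at this
        simp only [Nat.add_sub_cancel, Nat.sub_zero]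
        rw [this]
      · -- tail: the remaining words come from the rest
        apply List.map_congr_left
        intro i hi
        rw [List.mem_range] at hi
        have hj : n - 1 - i < n := by omega
        have := shift_tail (List.take 8 (c :: cs)) (List.drop 8 (c :: cs)) hF n hR
          (n - 1 - i) hj
        rw [hsplit] at this
        simp only [Function.comp_apply]
        have harg : n + 1 - 1 - Nat.succ i = n - 1 - i := by omega
        rw [harg, this]

theorem join_nil_eq_flatten (l : List (List Char)) : PySem.Chars.join [] l = l.flatten := by
  unfold PySem.Chars.join
  induction l with
  | nil => simp [List.intercalate]
  | cons x xs ih =>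
    cases xs with
    | nil => simp [List.intercalate]
    | cons y ys =>
      simp only [List.intercalate, List.intersperse] at ih ⊢
      simp_all [List.flatten]

theorem all_flatten (l : List (List Char)) (h : ∀ s ∈ l, s.all isHexChar = true) :
    l.flatten.all isHexChar = true := by
  rw [List.all_eq_true]
  intro x hx
  rw [List.mem_flatten] at hx
  obtain ⟨s, hs, hxs⟩ := hx
  exact List.all_eq_true.mp (h s hs) x hxs

theorem zfill_hex (c : Char) (cs : List Char) (w : Int) (h : isHexChar c = true) :
    PySem.Chars.zfill (c :: cs) w
      = List.replicate (w.toNat - (c :: cs).length) '0' ++ (c :: cs) := by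
  unfold PySem.Chars.zfill
  split_ifs with h1
  · have : w.toNat - (c :: cs).length = 0 := by omega
    rw [this]; simp
  · simp only []
    split_ifs with h2
    · exfalso
      rcases h2 with h2 | h2 <;> subst h2 <;> simp [isHexChar] at h
    · rfl

-- ===== VERDICT (by name: the statement is the Claim_ definition above) =====
theorem get_hex32_value_spec : Claim_equal_get_hex32_value := by
  intro name keydata _ hpre
  unfold Spec_get_hex32_value get_hex32_value get_hex32_value_alt get_hexc_value
  by_cases hc : (PySem.Dict.mk keydata).contains name = false
  · rw [if_pos hc, if_pos hc]
  · rw [if_neg hc, if_neg hc, if_neg hc]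
    unfold Pre_get_hex32_value at hpre
    set vals := (PySem.Dict.mk keydata).getD name [] with hvals
    set data := PySem.Chars.join [] (vals.map String.toList) with hdata
    have hhex : data.all isHexChar = true := by
      rw [hdata, join_nil_eq_flatten]
      apply all_flatten
      intro s hs
      rw [List.mem_map] at hs
      obtain ⟨t, ht, rfl⟩ := hs
      exact List.all_eq_true.mp hpre t ht
    simp only []
    by_cases hnil : data = []
    · simp [hnil, hex32Loop]
    · obtain ⟨c, cs, hd⟩ := List.exists_cons_of_ne_nil hnil
      have hcne : data.isEmpty = false := by rw [hd]; rfl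
      rw [hcne]
      simp only [Bool.false_eq_true, if_false]
      set l := data.length with hl
      have hlpos : 0 < l := by rw [hl, hd]; simp
      -- the two paddings coincide
      have hpadnat : ((-(l : Int)) % 8).toNat = (8 - l % 8) % 8 := by omega
      set pad := (8 - l % 8) % 8 with hpad
      have hpadded : (if l % 8 ≠ 0
            then PySem.Chars.zfill data ((l : Int) + 8 - (l : Int) % 8)
            else data)
          = List.replicate pad '0' ++ data := by
        by_cases hr : l % 8 = 0
        · rw [if_neg (by omega)]
          have : pad = 0 := by omega
          rw [this]; simp
        · rw [if_pos hr]
          have hch : isHexChar c = true := by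
            have := List.all_eq_true.mp hhex c (by rw [hd]; exact List.mem_cons_self)
            exact this
          rw [hd, zfill_hex c cs _ hch, ← hd]
          have hw : ((l : Int) + 8 - (l : Int) % 8).toNat - data.length = pad := by
            have h8 : (l : Int) % 8 = (l % 8 : Nat) := by omega
            rw [← hl]; omega
          rw [hw]
      rw [hpadnat, hpadded]
      set P := List.replicate pad '0' ++ data with hP
      have hPhex : P.all isHexChar = true := by
        rw [hP, List.all_append, Bool.and_eq_true]
        refine ⟨?_, hhex⟩
        rw [List.all_eq_true]
        intro x hx
        rw [List.mem_replicate] at hx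
        rw [hx.2]; rfl
      have hPlen : P.length = 8 * (P.length / 8) := by
        have h1 : P.length = pad + l := by
          rw [hP, List.length_append, List.length_replicate, hl]
        omega
      have hPne : P ≠ [] := by rw [hP, hd]; simp
      rw [loop_eq_extract (P.length / 8) P hPlen hPhex,
        pyIntHex?_eq P hPhex hPne]
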